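-- pv_equiv track=rewrite | github.com/keon/algorithms | algorithms/arrays/max_ones_index.py | max_ones_index
-- ===== SOURCE A (Python) =====
-- def max_ones_index(array: list[int]) -> int:
--     """Find the index of 0 to replace with 1 for the longest run of 1s.
--
--     Args:
--         array: Binary array containing only 0s and 1s.
--
--     Returns:
--         Index of the 0 to flip, or -1 if no 0 exists.
--
--     Examples:
--         >>> max_ones_index([1, 1, 1, 0, 1, 1, 1, 1, 1, 0, 1, 1, 1])
--         3
--     """
--     length = len(array)
--     max_count = 0
--     max_index = 0
--     prev_zero = -1
--     prev_prev_zero = -1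
--
--     for current in range(length):
--         if array[current] == 0:
--             if current - prev_prev_zero > max_count:
--                 max_count = current - prev_prev_zero
--                 max_index = prev_zero
--
--             prev_prev_zero = prev_zero
--             prev_zero = current
--
--     if length - prev_prev_zero > max_count:
--         max_index = prev_zero
--
--     return max_index
-- ===== SOURCE B (Python) =====
-- def max_ones_index(array: list[int]) -> int:
--     """Index of the 0 to flip for the longest run of 1s, or -1 if no 0 exists."""
--     n = len(array)
--     zeros = [i for i, v in enumerate(array) if v == 0]
--     if not zeros:
--         return -1
--     best_span = 0
--     best_index = -1
--     prev = -1
--     for z, nxt in zip(zeros, zeros[1:] + [n]):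
--         span = nxt - prev
--         if span > best_span:
--             best_span, best_index = span, z
--         prev = z
--     return best_index
-- ===== Notes on version B (the rewrite author's own statement) =====
-- stated objective: alternative
-- what changed: A's rolling two-variables-behind single pass (prev_zero/prev_prev_zero with a trailing fix-up after the loop) is replaced by first materialising the list of zero indices and then scanning it pairwise (each zero with its successor-or-len and the carried predecessor), computing each candidate span directly as next-prev.
import Mathlib
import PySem

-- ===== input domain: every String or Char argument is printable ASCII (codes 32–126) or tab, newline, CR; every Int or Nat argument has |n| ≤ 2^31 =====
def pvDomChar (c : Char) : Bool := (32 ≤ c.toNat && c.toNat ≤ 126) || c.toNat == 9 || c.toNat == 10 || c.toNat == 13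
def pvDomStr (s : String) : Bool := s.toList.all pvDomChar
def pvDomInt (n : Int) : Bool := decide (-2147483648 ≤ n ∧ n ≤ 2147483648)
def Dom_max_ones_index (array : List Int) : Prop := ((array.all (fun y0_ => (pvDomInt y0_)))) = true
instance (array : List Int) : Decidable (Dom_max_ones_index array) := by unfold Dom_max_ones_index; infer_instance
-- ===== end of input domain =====

-- B replaces A's rolling two-variables-behind single pass by an explicit zero-index list
-- scanned pairwise (alternative decomposition, same cost).

-- ===== PORT A =====
-- A's loop state: (max_count, max_index, prev_zero, prev_prev_zero)
def aStep (s : Int × Int × Int × Int) (current : Int) (v : Int) : Int × Int × Int × Int :=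
  if v == 0 then
    let (mc, mi, pz, ppz) := s
    let (mc, mi) := if current - ppz > mc then (current - ppz, pz) else (mc, mi)
    (mc, mi, current, pz)
  else s

def max_ones_index (array : List Int) : Int :=
  let length : Int := PySem.List.len array
  let st := (PySem.List.pyRange 0 length 1).foldl
    (fun s current => aStep s current (PySem.List.pyGetD array current 0)) (0, 0, -1, -1)
  let (mc, mi, pz, ppz) := st
  if length - ppz > mc then pz else mi

-- ===== PORT B =====
-- B's loop state: (best_span, best_index, prev)
def bStep (s : Int × Int × Int) (p : Int × Int) : Int × Int × Int :=
  let (z, nxt) := p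
  let (bs, bi, prev) := s
  let span := nxt - prev
  let (bs, bi) := if span > bs then (span, z) else (bs, bi)
  (bs, bi, z)

def max_ones_index_alt (array : List Int) : Int :=
  let n : Int := PySem.List.len array
  let zeros : List Int :=
    ((PySem.List.enumerate array 0).filter (fun p => p.2 == 0)).map (fun p => p.1)
  if zeros = [] then -1
  else
    let st := (zeros.zip (zeros.drop 1 ++ [n])).foldl bStep (0, -1, -1)
    st.2.1

-- ===== PRECONDITION & SPEC =====
def Spec_max_ones_index (array : List Int) (out : Int) : Prop := out = max_ones_index_alt array
instance (array : List Int) (out : Int) : Decidable (Spec_max_ones_index array out) := by unfold Spec_max_ones_index; infer_instance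

-- ===== CLAIM (what is proved, stated in full; the proofs are below) =====
def Claim_equal_max_ones_index : Prop := ∀ (array : List Int), Dom_max_ones_index array → Spec_max_ones_index array (max_ones_index array)

-- ===== LEMMAS AND PROOFS =====

-- A's fold over the zero indices, followed by the trailing fix-up, as one recursion.
def aRun (st : Int × Int × Int × Int) (zs : List Int) (n : Int) : Int :=
  match zs with
  | [] => if n - st.2.2.2 > st.1 then st.2.2.1 else st.2.1
  | z :: t => aRun (aStep st z 0) t n

-- B's loop, with the next-zero-or-n peek made explicit, as one recursion.
def bRun (st : Int × Int × Int) (zs : List Int) (n : Int) : Int :=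
  match zs with
  | [] => st.2.1
  | z :: t => bRun (bStep st (z, t.headD n)) t n

theorem aStep_zero (mc mi pz ppz z : Int) :
    aStep (mc, mi, pz, ppz) z 0 =
      if z - ppz > mc then (z - ppz, pz, z, pz) else (mc, mi, z, pz) := by
  simp only [aStep, beq_self_eq_true, if_true]
  split_ifs <;> rfl

theorem aStep_ne (s : Int × Int × Int × Int) (z v : Int) (h : v ≠ 0) : aStep s z v = s := by
  simp [aStep, h]

theorem bStep_eq (bs bi prev z nxt : Int) :
    bStep (bs, bi, prev) (z, nxt) =
      if nxt - prev > bs then (nxt - prev, z, z) else (bs, bi, z) := by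
  simp only [bStep]
  split_ifs <;> rfl

-- A's fold over the zero indices plus the trailing fix-up equals aRun.
theorem aRun_eq_foldl (zs : List Int) (st : Int × Int × Int × Int) (n : Int) :
    aRun st zs n =
      (let (mc, mi, pz, ppz) := zs.foldl (fun s z => aStep s z 0) st
       if n - ppz > mc then pz else mi) := by
  induction zs generalizing st with
  | nil => rfl
  | cons z t ih => simpa [aRun] using ih (aStep st z 0)

-- B's fold over the zipped list equals bRun.
theorem bRun_eq_foldl (zs : List Int) (st : Int × Int × Int) (n : Int) :
    bRun st zs n = ((zs.zip (zs.drop 1 ++ [n])).foldl bStep st).2.1 := by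
  induction zs generalizing st with
  | nil => rfl
  | cons z t ih =>
    cases t with
    | nil => rfl
    | cons z1 t1 => simpa [bRun] using ih (bStep st (z, z1))

-- The key alignment: A's state before consuming zs corresponds to B's state one zero behind.
theorem aRun_eq_bRun (zs : List Int) (n : Int) :
    ∀ (mc mi pz ppz : Int), aRun (mc, mi, pz, ppz) zs n = bRun (mc, mi, ppz) (pz :: zs) n := by
  induction zs with
  | nil =>
    intro mc mi pz ppz
    simp only [aRun, bRun, List.headD_nil, bStep_eq]
    split_ifs <;> rfl
  | cons z t ih =>
    intro mc mi pz ppz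
    show aRun (aStep (mc, mi, pz, ppz) z 0) t n = bRun (mc, mi, ppz) (pz :: z :: t) n
    rw [aStep_zero]
    conv_rhs => rw [bRun]
    simp only [List.headD_cons, bStep_eq]
    split_ifs with h
    · exact ih _ _ _ _
    · exact ih _ _ _ _

-- With both thresholds beaten at the first zero, the two initial states converge.
theorem bRun_first_step (z0 n : Int) (t : List Int) (hlt : z0 < t.headD n) (h0 : 0 ≤ z0) :
    bRun (z0 + 1, -1, -1) (z0 :: t) n = bRun (0, -1, -1) (z0 :: t) n := by
  simp only [bRun, bStep_eq]
  rw [if_pos (by omega : t.headD n - -1 > z0 + 1), if_pos (by omega : t.headD n - -1 > (0:Int))]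

-- Facts about the zero-index list extracted from enumerate.
theorem zeros_facts (array : List Int) :
    (∀ z ∈ ((PySem.List.enumerate array 0).filter (fun p => p.2 == 0)).map (fun p => p.1),
        0 ≤ z ∧ z < PySem.List.len array) ∧
    (((PySem.List.enumerate array 0).filter (fun p => p.2 == 0)).map (fun p => p.1)).Pairwise (· < ·) := by
  constructor
  · intro z hz
    simp only [List.mem_map, List.mem_filter] at hz
    obtain ⟨p, ⟨hp, _⟩, rfl⟩ := hz
    rw [PySem.List.mem_enumerate_iff] at hp
    obtain ⟨k, hk, rfl⟩ := hp
    simp [PySem.List.len_eq]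
    omega
  · refine List.Pairwise.map _ (fun a b h => h) ?_
    exact List.Pairwise.filter _ (PySem.List.pairwise_lt_enumerate array 0)

-- A's fold over all (index, value) pairs collapses to a fold over the zero indices.
theorem foldl_enumerate_filter (l : List (Int × Int)) (st : Int × Int × Int × Int) :
    l.foldl (fun s p => aStep s p.1 p.2) st
      = ((l.filter (fun p => p.2 == 0)).map (fun p => p.1)).foldl (fun s z => aStep s z 0) st := by
  induction l generalizing st with
  | nil => rfl
  | cons p t ih =>
    cases p with
    | mk pi pv =>
      by_cases h : pv = 0
      · subst h
        simpa [List.filter_cons] using ih (aStep st pi 0)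
      · simpa [List.filter_cons, h, aStep_ne st pi pv h] using ih st

theorem max_ones_index_eq_aRun (array : List Int) :
    max_ones_index array =
      aRun (0, 0, -1, -1)
        (((PySem.List.enumerate array 0).filter (fun p => p.2 == 0)).map (fun p => p.1))
        (PySem.List.len array) := by
  rw [aRun_eq_foldl]
  simp only [max_ones_index]
  rw [← foldl_enumerate_filter]
  rw [PySem.List.enumerate_eq_map_pyRange (d := 0), List.foldl_map]

-- ===== VERDICT (by name: the statement is the Claim_ definition above) =====
theorem max_ones_index_spec : Claim_equal_max_ones_index := by
  intro array _
  unfold Spec_max_ones_index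
  set n := PySem.List.len array with hn
  set zeros := ((PySem.List.enumerate array 0).filter (fun p => p.2 == 0)).map (fun p => p.1)
    with hzeros
  have hA : max_ones_index array = aRun (0, 0, -1, -1) zeros n := max_ones_index_eq_aRun array
  have hfacts := zeros_facts array
  rw [← hzeros, ← hn] at hfacts
  rw [hA, aRun_eq_bRun]
  cases hz : zeros with
  | nil =>
    have hn0 : 0 ≤ n := by simp [hn, PySem.List.len_eq]
    simp only [max_ones_index_alt, ← hzeros, ← hn, hz]
    simp only [bRun, List.headD_nil, bStep_eq]
    rw [if_pos (by omega : n - -1 > (0:Int))]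
    rfl
  | cons z0 t =>
    have hz0 : 0 ≤ z0 ∧ z0 < n := hfacts.1 z0 (hz ▸ List.mem_cons_self)
    have hlt : z0 < t.headD n := by
      cases t with
      | nil => exact hz0.2
      | cons z1 t1 =>
        have hp := hfacts.2
        rw [hz] at hp
        exact (List.pairwise_cons.mp hp).1 z1 List.mem_cons_self
    have hstep1 : bRun (0, 0, -1) (-1 :: z0 :: t) n = bRun (z0 + 1, -1, -1) (z0 :: t) n := by
      conv_lhs => rw [bRun]
      simp only [List.headD_cons, bStep_eq]
      rw [if_pos (by omega : z0 - -1 > (0:Int))]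
      rw [(by omega : z0 - -1 = z0 + 1)]
    rw [hstep1, bRun_first_step z0 n t hlt hz0.1]
    have hne : zeros ≠ [] := by rw [hz]; exact List.cons_ne_nil _ _
    simp only [max_ones_index_alt, ← hzeros, ← hn, if_neg hne]
    rw [← bRun_eq_foldl, hz]
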